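-- pv_equiv track=rewrite | github.com/The-OpenROAD-Project/OpenLane | scripts/spef_extractor/lef_def_parser/plot_layout.py | sort_vias_by_row
-- ===== SOURCE A (Python) =====
-- def sort_vias_by_row(layout_area, row_height, vias):
--     """
--     Sort the vias by row
--     :param layout_area: a list [x, y] that stores the area of the layout
--     :param vias: a list of vias that need to be sorted
--     :return: a list of rows, each containing a list of vias in that row.
--     """
--     num_rows = layout_area[1] // row_height + 1
--     rows = []
--     for i in range(num_rows):
--         rows.append([])
--     for via in vias:
--         via_y = via[0][1]
--         row_dest = via_y // row_height
--         rows[row_dest].append(via)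
--     # sort vias in each row based on x-coordinate
--     for each_row in rows:
--         each_row.sort(key = lambda x: x[0][0])
--     return rows
-- ===== SOURCE B (Python) =====
-- def sort_vias_by_row(layout_area, row_height, vias):
--     # B: sort the whole via list once by x (stable), then distribute into row
--     # buckets in one pass -- instead of bucketing first and sorting every row.
--     num_rows = layout_area[1] // row_height + 1
--     rows = [[] for _ in range(num_rows)]
--     for via in sorted(vias, key=lambda v: v[0][0]):
--         rows[via[0][1] // row_height].append(via)
--     return rows
-- ===== Notes on version B (the rewrite author's own statement) =====
-- stated objective: alternative
-- what changed: B sorts the whole via list once by x (stable) and then distributes vias into row buckets in one pass, instead of A's bucket-first-then-sort-each-row; stability of Python's sort makes the per-row orders identical, ties included.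
import Mathlib
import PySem

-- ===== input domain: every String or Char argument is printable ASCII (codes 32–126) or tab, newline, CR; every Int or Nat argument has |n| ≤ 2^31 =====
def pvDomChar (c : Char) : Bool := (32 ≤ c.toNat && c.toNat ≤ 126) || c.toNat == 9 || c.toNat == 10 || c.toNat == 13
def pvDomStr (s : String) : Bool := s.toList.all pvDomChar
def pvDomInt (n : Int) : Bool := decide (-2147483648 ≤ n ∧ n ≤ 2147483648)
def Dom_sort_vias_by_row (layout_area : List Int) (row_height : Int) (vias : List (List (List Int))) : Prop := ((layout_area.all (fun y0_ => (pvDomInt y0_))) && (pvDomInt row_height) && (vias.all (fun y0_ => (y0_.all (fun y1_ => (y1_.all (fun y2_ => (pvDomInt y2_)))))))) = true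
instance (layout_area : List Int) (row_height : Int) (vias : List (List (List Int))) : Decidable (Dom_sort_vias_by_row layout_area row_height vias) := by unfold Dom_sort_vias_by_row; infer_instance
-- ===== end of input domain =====

-- B sorts the whole via list once by x (stable) and then distributes into row
-- buckets in one pass, instead of A's bucket-first-then-sort-each-row.

-- ===== PORT A =====
-- shared helpers (the same Python expressions occur verbatim in both sources):
-- x-coordinate key via[0][0] / lambda x: x[0][0]
def pvKeyX (v : List (List Int)) : Int :=
  PySem.List.pyGetD (PySem.List.pyGetD v 0 []) 0 0
-- via[0][1] // row_height
def pvRowDest (row_height : Int) (v : List (List Int)) : Int :=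
  PySem.Int.floordiv (PySem.List.pyGetD (PySem.List.pyGetD v 0 []) 1 0) row_height
-- layout_area[1] // row_height + 1
def pvNumRows (layout_area : List Int) (row_height : Int) : Int :=
  PySem.Int.floordiv (PySem.List.pyGetD layout_area 1 0) row_height + 1
-- rows[via[0][1] // row_height].append(via)  (Python index: negative wraps,
-- out of range raises IndexError -- the 'none' branch is unreachable under Pre_)
def pvPlace (row_height : Int) (rows : List (List (List (List Int)))) (via : List (List Int)) :
    List (List (List (List Int))) :=
  match PySem.List.pyIdx? rows.length (pvRowDest row_height via) with
  | some j => rows.modify j (fun r => r ++ [via])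
  | none => rows

def sort_vias_by_row (layout_area : List Int) (row_height : Int) (vias : List (List (List Int))) : List (List (List (List Int))) :=
  let num_rows := pvNumRows layout_area row_height
  let rows0 := (PySem.List.pyRange 0 num_rows 1).foldl (fun r _ => r ++ [[]]) []
  let rows := vias.foldl (pvPlace row_height) rows0
  rows.map (fun r => PySem.List.sorted r pvKeyX)

-- ===== PORT B =====
def sort_vias_by_row_alt (layout_area : List Int) (row_height : Int) (vias : List (List (List Int))) : List (List (List (List Int))) :=
  let num_rows := pvNumRows layout_area row_height
  let rows0 : List (List (List (List Int))) := List.replicate num_rows.toNat []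
  (PySem.List.sorted vias pvKeyX).foldl (pvPlace row_height) rows0

-- ===== PRECONDITION & SPEC =====
-- Pre_ excludes exactly the inputs where the Python A raises: layout_area[1]
-- (IndexError), row_height = 0 (ZeroDivisionError), via[0][1]/via[0][0]
-- (IndexError on malformed vias), and a row index outside Python's valid
-- (wrapping) index range for the rows list (IndexError).
def Pre_sort_vias_by_row (layout_area : List Int) (row_height : Int) (vias : List (List (List Int))) : Prop :=
  2 ≤ layout_area.length ∧ row_height ≠ 0 ∧
  ∀ v ∈ vias, 1 ≤ v.length ∧ 2 ≤ (PySem.List.pyGetD v 0 []).length ∧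
    -(pvNumRows layout_area row_height) ≤ pvRowDest row_height v ∧
    pvRowDest row_height v < pvNumRows layout_area row_height
instance (layout_area : List Int) (row_height : Int) (vias : List (List (List Int))) : Decidable (Pre_sort_vias_by_row layout_area row_height vias) := by unfold Pre_sort_vias_by_row; infer_instance

def pvWitness_sort_vias_by_row : List Int × Int × List (List (List Int)) :=
  ([10, 5], 2, [[[1, 3]], [[0, 1]], [[4, 3]]])

def Spec_sort_vias_by_row (layout_area : List Int) (row_height : Int) (vias : List (List (List Int))) (out : List (List (List (List Int)))) : Prop := out = sort_vias_by_row_alt layout_area row_height vias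
instance (layout_area : List Int) (row_height : Int) (vias : List (List (List Int))) (out : List (List (List (List Int)))) : Decidable (Spec_sort_vias_by_row layout_area row_height vias out) := by unfold Spec_sort_vias_by_row; infer_instance

-- ===== CLAIM (what is proved, stated in full; the proofs are below) =====
def Claim_equal_sort_vias_by_row : Prop := ∀ (layout_area : List Int) (row_height : Int) (vias : List (List (List Int))), Dom_sort_vias_by_row layout_area row_height vias → Pre_sort_vias_by_row layout_area row_height vias → Spec_sort_vias_by_row layout_area row_height vias (sort_vias_by_row layout_area row_height vias)

-- ===== LEMMAS AND PROOFS =====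

-- each bucket of the distribution loop = old bucket ++ (vias routed to it, in order)
lemma pv_dist_getElem (rh : Int) (vias : List (List (List Int))) :
    ∀ rows, (∀ v ∈ vias, ∃ j, j < rows.length ∧
        PySem.List.pyIdx? rows.length (pvRowDest rh v) = some j) →
    ∀ i : Nat, (vias.foldl (pvPlace rh) rows)[i]? =
      (rows[i]?).map (fun r => r ++ vias.filter
        (fun v => PySem.List.pyIdx? rows.length (pvRowDest rh v) == some i)) := by
  induction vias with
  | nil =>
    intro rows _ i
    simp [Option.map_id']
  | cons v vs ih =>
    intro rows hv i
    obtain ⟨j, hj, hidx⟩ := hv v (by simp)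
    have hplace : pvPlace rh rows v = rows.modify j (fun r => r ++ [v]) := by
      unfold pvPlace; rw [hidx]
    have hlen : (rows.modify j (fun r => r ++ [v])).length = rows.length := by simp
    simp only [List.foldl_cons, hplace]
    rw [ih _ (by
      intro w hw
      obtain ⟨k, hk, hk2⟩ := hv w (by simp [hw])
      exact ⟨k, by rw [hlen]; exact hk, by rw [hlen]; exact hk2⟩)]
    rw [List.getElem?_modify]
    simp only [hlen, List.filter_cons, hidx]
    by_cases hji : j = i
    · subst hji
      simp only [beq_self_eq_true]
      cases rows[j]? <;> simp
    · have hne : (some j == some i) = false := by simp [hji]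
      simp [hji, hne]

-- building num_rows empty buckets
lemma pv_foldl_append_nil {α : Type} (x : α) (l : List Int) :
    ∀ init : List α, l.foldl (fun r _ => r ++ [x]) init = init ++ List.replicate l.length x := by
  induction l with
  | nil => intro init; simp
  | cons a t ih =>
    intro init
    simp only [List.foldl_cons, ih, List.length_cons, List.replicate_succ,
      List.append_assoc, List.singleton_append]

-- equation lemmas for PySem.List.insertBy with the strictly-smaller-key test
lemma pv_ins_nil (x : List (List Int)) :
    PySem.List.insertBy (fun a b => decide (pvKeyX a < pvKeyX b)) x [] = [x] := by
  simp [PySem.List.insertBy]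

lemma pv_ins_pos (x z : List (List Int)) (t : List (List (List Int)))
    (h : pvKeyX x < pvKeyX z) :
    PySem.List.insertBy (fun a b => decide (pvKeyX a < pvKeyX b)) x (z :: t) = x :: z :: t := by
  simp [PySem.List.insertBy, h]

lemma pv_ins_neg (x z : List (List Int)) (t : List (List (List Int)))
    (h : ¬ pvKeyX x < pvKeyX z) :
    PySem.List.insertBy (fun a b => decide (pvKeyX a < pvKeyX b)) x (z :: t) =
      z :: PySem.List.insertBy (fun a b => decide (pvKeyX a < pvKeyX b)) x t := by
  simp [PySem.List.insertBy, h]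

lemma pv_insertBy_eq_cons (x : List (List Int)) (zs : List (List (List Int)))
    (h : ∀ z ∈ zs, pvKeyX x < pvKeyX z) :
    PySem.List.insertBy (fun a b => decide (pvKeyX a < pvKeyX b)) x zs = x :: zs := by
  cases zs with
  | nil => exact pv_ins_nil x
  | cons z t => exact pv_ins_pos x z t (h z (by simp))

lemma pv_pairwise_insertBy (x : List (List Int)) (zs : List (List (List Int)))
    (h : zs.Pairwise (fun a b => pvKeyX a ≤ pvKeyX b)) :
    (PySem.List.insertBy (fun a b => decide (pvKeyX a < pvKeyX b)) x zs).Pairwise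
      (fun a b => pvKeyX a ≤ pvKeyX b) := by
  induction zs with
  | nil => rw [pv_ins_nil]; simp
  | cons z t ih =>
    obtain ⟨hz, ht⟩ := List.pairwise_cons.mp h
    by_cases hlt : pvKeyX x < pvKeyX z
    · rw [pv_ins_pos x z t hlt]
      refine List.pairwise_cons.mpr ⟨?_, h⟩
      intro b hb
      rcases List.mem_cons.mp hb with rfl | hb
      · exact le_of_lt hlt
      · exact le_trans (le_of_lt hlt) (hz b hb)
    · rw [pv_ins_neg x z t hlt]
      refine List.pairwise_cons.mpr ⟨?_, ih ht⟩
      intro b hb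
      rw [PySem.List.mem_insertBy] at hb
      rcases hb with rfl | hb
      · exact le_of_not_gt hlt
      · exact hz b hb

lemma pv_filter_insertBy (p : List (List Int) → Bool) (x : List (List Int))
    (zs : List (List (List Int))) (h : zs.Pairwise (fun a b => pvKeyX a ≤ pvKeyX b)) :
    (PySem.List.insertBy (fun a b => decide (pvKeyX a < pvKeyX b)) x zs).filter p =
      if p x then PySem.List.insertBy (fun a b => decide (pvKeyX a < pvKeyX b)) x (zs.filter p)
      else zs.filter p := by
  induction zs with
  | nil =>
    rw [pv_ins_nil]
    cases hpx : p x <;> simp [hpx, pv_ins_nil]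
  | cons z t ih =>
    obtain ⟨hz, ht⟩ := List.pairwise_cons.mp h
    by_cases hlt : pvKeyX x < pvKeyX z
    · rw [pv_ins_pos x z t hlt]
      cases hpx : p x
      · simp [List.filter_cons, hpx]
      · have hall : ∀ w ∈ (z :: t).filter p, pvKeyX x < pvKeyX w := by
          intro w hw
          rcases List.mem_cons.mp (List.mem_of_mem_filter hw) with rfl | hw'
          · exact hlt
          · exact lt_of_lt_of_le hlt (hz w hw')
        rw [pv_insertBy_eq_cons x ((z :: t).filter p) hall]
        simp [List.filter_cons, hpx]
    · rw [pv_ins_neg x z t hlt]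
      cases hpz : p z
      · simp [hpz, ih ht]
      · cases hpx : p x
        · simp [hpz, hpx, ih ht]
        · simp [hpz, hpx, ih ht, pv_ins_neg x z (t.filter p) hlt]

lemma pv_filter_foldl_ins (p : List (List Int) → Bool) (vias : List (List (List Int))) :
    ∀ acc, acc.Pairwise (fun a b => pvKeyX a ≤ pvKeyX b) →
    (vias.foldl (fun a x => PySem.List.insertBy (fun a b => decide (pvKeyX a < pvKeyX b)) x a) acc).filter p =
      (vias.filter p).foldl (fun a x => PySem.List.insertBy (fun a b => decide (pvKeyX a < pvKeyX b)) x a) (acc.filter p) := by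
  induction vias with
  | nil => intro acc _; rfl
  | cons v vs ih =>
    intro acc hacc
    simp only [List.foldl_cons, List.filter_cons]
    rw [ih _ (pv_pairwise_insertBy v acc hacc), pv_filter_insertBy p v acc hacc]
    cases hpv : p v <;> simp

-- filtering commutes with the stable sort
lemma pv_filter_sorted (p : List (List Int) → Bool) (vias : List (List (List Int))) :
    (PySem.List.sorted vias pvKeyX).filter p = PySem.List.sorted (vias.filter p) pvKeyX := by
  rw [PySem.List.sorted_eq_foldl_insertBy, PySem.List.sorted_eq_foldl_insertBy]
  simpa using pv_filter_foldl_ins p vias [] (by simp)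

-- ===== VERDICT (by name: the statement is the Claim_ definition above) =====
theorem sort_vias_by_row_spec : Claim_equal_sort_vias_by_row := by
  intro layout_area row_height vias _ hpre
  obtain ⟨_, _, hvias⟩ := hpre
  unfold Spec_sort_vias_by_row sort_vias_by_row sort_vias_by_row_alt
  simp only []
  set n := pvNumRows layout_area row_height with hn
  have hrows0 : (PySem.List.pyRange 0 n 1).foldl
      (fun r _ => r ++ [[]]) ([] : List (List (List (List Int)))) =
      List.replicate n.toNat [] := by
    rw [pv_foldl_append_nil]
    simp [PySem.List.length_pyRange_one]
  rw [hrows0]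
  have hlenr : (List.replicate n.toNat ([] : List (List (List Int)))).length = n.toNat := by simp
  have hv : ∀ v ∈ vias, ∃ j, j < n.toNat ∧
      PySem.List.pyIdx? n.toNat (pvRowDest row_height v) = some j := by
    intro v hvmem
    obtain ⟨_, _, hlo, hhi⟩ := hvias v hvmem
    unfold PySem.List.pyIdx?
    by_cases h0 : 0 ≤ pvRowDest row_height v
    · refine ⟨(pvRowDest row_height v).toNat, by omega, ?_⟩
      rw [if_pos h0, if_pos (by omega)]
    · refine ⟨n.toNat - (-(pvRowDest row_height v)).toNat, by omega, ?_⟩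
      rw [if_neg h0, if_pos (by omega)]
  apply List.ext_getElem?
  intro i
  rw [List.getElem?_map]
  rw [pv_dist_getElem row_height vias _ (by rw [hlenr]; exact hv) i]
  rw [pv_dist_getElem row_height (PySem.List.sorted vias pvKeyX) _
      (by rw [hlenr]; intro v hvmem; exact hv v ((PySem.List.mem_sorted _ _ _ _).mp hvmem)) i]
  rw [hlenr]
  by_cases hin : i < n.toNat
  · rw [List.getElem?_replicate, if_pos hin]
    simp only [Option.map_some, List.nil_append, Option.some.injEq]
    exact (pv_filter_sorted _ vias).symm
  · rw [List.getElem?_replicate, if_neg hin]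
    simp
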